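-- pv_equiv track=rewrite | github.com/Selvawen/dfir-ai-assistant | app/core/categorize.py | top_category
-- ===== SOURCE A (Python) =====
-- from typing import List, Dict, Any
--
-- def categorize_detection(title: str) -> str:
--     t = (title or "").lower()
--
--     # Auth / Credential access / brute force
--     if "failed logon" in t or "brute force" in t or "logon" in t:
--         return "Auth"
--
--     # Lateral movement / remote services
--     if "lateral" in t or "remote-logged" in t or "remote logon" in t:
--         return "Lateral"
--
--     # Execution / scripting / LOLBins
--     if "powershell" in t or "lolbin" in t or "office application spawned" in t or "command line" in t:
--         return "Execution"
--
--     # Persistence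
--     if "service created" in t or "scheduled task" in t or "persistence" in t:
--         return "Persistence"
--
--     return "Other"
--
-- def top_category(detections: List[Dict[str, Any]]) -> str:
--     """
--     Returns the highest-priority category seen in detections.
--     Priority order chosen to match SOC triage feel.
--     """
--     if not detections:
--         return "None"
--
--     cats = {categorize_detection(d.get("title", "")) for d in detections}
--
--     priority = ["Execution", "Persistence", "Lateral", "Auth", "Other"]
--     for p in priority:
--         if p in cats:
--             return p
--     return "Other"
-- ===== SOURCE B (Python) =====
-- def categorize_detection(title: str) -> str:
--     t = (title or "").lower()
--
--     if "failed logon" in t or "brute force" in t or "logon" in t: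
--         return "Auth"
--
--     if "lateral" in t or "remote-logged" in t or "remote logon" in t:
--         return "Lateral"
--
--     if "powershell" in t or "lolbin" in t or "office application spawned" in t or "command line" in t:
--         return "Execution"
--
--     if "service created" in t or "scheduled task" in t or "persistence" in t:
--         return "Persistence"
--
--     return "Other"
--
--
-- def top_category(detections):
--     if not detections:
--         return "None"
--     priority = ["Execution", "Persistence", "Lateral", "Auth", "Other"]
--     best = len(priority)
--     for d in detections:
--         i = priority.index(categorize_detection(d.get("title", "")))
--         if i < best:
--             best = i
--     return priority[best]
-- ===== Notes on version B (the rewrite author's own statement) =====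
-- stated objective: alternative
-- what changed: Instead of building a set of categories and then scanning the priority list for the first member, B makes one pass over detections keeping a running minimum priority index and indexes the priority list once at the end.
import Mathlib
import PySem

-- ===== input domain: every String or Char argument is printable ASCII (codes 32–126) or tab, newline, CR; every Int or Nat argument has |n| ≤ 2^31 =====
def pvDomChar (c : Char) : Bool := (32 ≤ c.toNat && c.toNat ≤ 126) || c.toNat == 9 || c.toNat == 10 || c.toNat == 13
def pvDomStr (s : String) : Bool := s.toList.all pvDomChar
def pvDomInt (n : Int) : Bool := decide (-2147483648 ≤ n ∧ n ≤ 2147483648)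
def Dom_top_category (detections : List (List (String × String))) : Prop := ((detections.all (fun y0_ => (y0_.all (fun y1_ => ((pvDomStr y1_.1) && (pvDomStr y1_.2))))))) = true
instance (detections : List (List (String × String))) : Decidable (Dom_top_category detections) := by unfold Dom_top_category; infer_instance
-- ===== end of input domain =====

-- B replaces A's set-of-categories + priority scan by a single pass keeping a running minimum priority index (alternative decomposition, same cost).


-- ===== PORT A =====
-- shared helper (identical in Source A and Source B)
def categorize_detection (title : String) : String :=
  -- '(title or "")': for a string argument this is title when nonempty and "" otherwise; lower "" = "", so lowering title directly is exact
  let t := PySem.Str.lower title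
  if PySem.Str.isIn "failed logon" t || PySem.Str.isIn "brute force" t || PySem.Str.isIn "logon" t then "Auth"
  else if PySem.Str.isIn "lateral" t || PySem.Str.isIn "remote-logged" t || PySem.Str.isIn "remote logon" t then "Lateral"
  else if PySem.Str.isIn "powershell" t || PySem.Str.isIn "lolbin" t || PySem.Str.isIn "office application spawned" t || PySem.Str.isIn "command line" t then "Execution"
  else if PySem.Str.isIn "service created" t || PySem.Str.isIn "scheduled task" t || PySem.Str.isIn "persistence" t then "Persistence"
  else "Other"

def top_category (detections : List (List (String × String))) : String :=
  if detections = [] then "None"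
  else
    let cats : PySem.Set String := PySem.Set.ofList (detections.map (fun d => categorize_detection (PySem.Dict.getD (PySem.Dict.mk d) "title" "")))
    let priority : List String := ["Execution", "Persistence", "Lateral", "Auth", "Other"]
    -- 'for p in priority: if p in cats: return p' then 'return "Other"'
    (priority.find? (fun p => PySem.Set.contains cats p)).getD "Other"

-- ===== PORT B =====
def top_category_alt (detections : List (List (String × String))) : String :=
  if detections = [] then "None"
  else
    let priority : List String := ["Execution", "Persistence", "Lateral", "Auth", "Other"]
    let best := detections.foldl (fun best d =>
      -- priority.index never raises: categorize_detection always returns a member of priority, so the .getD default is never used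
      let i := (PySem.List.index? priority (categorize_detection (PySem.Dict.getD (PySem.Dict.mk d) "title" ""))).getD priority.length
      if i < best then i else best) priority.length
    -- priority[best]; best < 5 whenever detections is nonempty, so the default is never used
    (PySem.List.pyGet? priority (best : Int)).getD ""

-- ===== PRECONDITION & SPEC =====
def Spec_top_category (detections : List (List (String × String))) (out : String) : Prop := out = top_category_alt detections
instance (detections : List (List (String × String))) (out : String) : Decidable (Spec_top_category detections out) := by unfold Spec_top_category; infer_instance

-- ===== CLAIM (what is proved, stated in full; the proofs are below) =====
def Claim_equal_top_category : Prop := ∀ (detections : List (List (String × String))), Dom_top_category detections → Spec_top_category detections (top_category detections)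

-- ===== LEMMAS AND PROOFS =====

-- category of one detection (proof abbreviation)
def pvCat (d : List (String × String)) : String := categorize_detection (PySem.Dict.getD (PySem.Dict.mk d) "title" "")

-- the minimum priority index present in a list of category strings
def pvFlag (L : List String) : Nat :=
  if "Execution" ∈ L then 0 else if "Persistence" ∈ L then 1 else if "Lateral" ∈ L then 2
  else if "Auth" ∈ L then 3 else if "Other" ∈ L then 4 else 5

lemma cat5 (t : String) : categorize_detection t = "Auth" ∨ categorize_detection t = "Lateral" ∨
    categorize_detection t = "Execution" ∨ categorize_detection t = "Persistence" ∨ categorize_detection t = "Other" := by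
  unfold categorize_detection
  dsimp only
  split_ifs <;> simp

lemma idxE : (PySem.List.index? ["Execution", "Persistence", "Lateral", "Auth", "Other"] ("Execution" : String)).getD 5 = 0 := by decide
lemma idxP : (PySem.List.index? ["Execution", "Persistence", "Lateral", "Auth", "Other"] ("Persistence" : String)).getD 5 = 1 := by decide
lemma idxL : (PySem.List.index? ["Execution", "Persistence", "Lateral", "Auth", "Other"] ("Lateral" : String)).getD 5 = 2 := by decide
lemma idxA : (PySem.List.index? ["Execution", "Persistence", "Lateral", "Auth", "Other"] ("Auth" : String)).getD 5 = 3 := by decide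
lemma idxO : (PySem.List.index? ["Execution", "Persistence", "Lateral", "Auth", "Other"] ("Other" : String)).getD 5 = 4 := by decide

lemma foldl_min_eq (dets : List (List (String × String))) (acc : Nat) (hacc : acc ≤ 5) :
    dets.foldl (fun best d =>
      let i := (PySem.List.index? ["Execution", "Persistence", "Lateral", "Auth", "Other"] (categorize_detection (PySem.Dict.getD (PySem.Dict.mk d) "title" ""))).getD 5
      if i < best then i else best) acc
    = min acc (pvFlag (dets.map pvCat)) := by
  induction dets generalizing acc with
  | nil => simp [pvFlag]; omega
  | cons d ds ih =>
    have hc : pvCat d = categorize_detection (PySem.Dict.getD (PySem.Dict.mk d) "title" "") := rfl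
    rcases cat5 (PySem.Dict.getD (PySem.Dict.mk d) "title" "") with h | h | h | h | h <;>
    · simp only [List.foldl_cons, List.map_cons, hc, h, idxE, idxP, idxL, idxA, idxO]
      rw [ih _ (by split <;> omega)]
      simp [pvFlag, List.mem_cons]
      try (split_ifs <;> omega)

lemma main_eq (dets : List (List (String × String))) : top_category dets = top_category_alt dets := by
  cases dets with
  | nil => rfl
  | cons d ds =>
    rw [top_category, top_category_alt]
    simp only [List.cons_ne_nil, if_false, List.length_cons, List.length_nil]
    rw [foldl_min_eq (d :: ds) 5 (by omega)]
    have hm : (List.map (fun d => categorize_detection (PySem.Dict.getD (PySem.Dict.mk d) "title" "")) (d :: ds)) = List.map pvCat (d :: ds) := rfl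
    rw [hm]
    have hc : pvCat d = categorize_detection (PySem.Dict.getD (PySem.Dict.mk d) "title" "") := rfl
    have hhd : pvCat d ∈ List.map pvCat (d :: ds) := by simp
    have hcon : ∀ p : String, (PySem.Set.ofList (List.map pvCat (d :: ds))).contains p = decide (p ∈ List.map pvCat (d :: ds)) := by
      intro p; rw [Bool.eq_iff_iff]; simp [PySem.Set.mem_ofList]
    simp only [List.find?_cons, List.find?_nil, hcon, pvFlag]
    by_cases h1 : "Execution" ∈ List.map pvCat (d :: ds) <;>
    by_cases h2 : "Persistence" ∈ List.map pvCat (d :: ds) <;>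
    by_cases h3 : "Lateral" ∈ List.map pvCat (d :: ds) <;>
    by_cases h4 : "Auth" ∈ List.map pvCat (d :: ds) <;>
    by_cases h5 : "Other" ∈ List.map pvCat (d :: ds) <;>
      simp only [h1, h2, h3, h4, h5, decide_true, decide_false, if_true, if_false] <;>
      try decide
    -- one branch remains: all five categories absent, contradicting the head detection's category
    exfalso
    rcases cat5 (PySem.Dict.getD (PySem.Dict.mk d) "title" "") with h | h | h | h | h <;>
      rw [hc, h] at hhd <;>
      first | exact h1 hhd | exact h2 hhd | exact h3 hhd | exact h4 hhd | exact h5 hhd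

theorem top_category_spec : Claim_equal_top_category := by
  intro dets _
  show top_category dets = top_category_alt dets
  exact main_eq dets
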